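-- pv_equiv track=rewrite | github.com/douyo01-byte/openclaw-factory | bots/ci_guard_v1.py | conclusion_from_rollup
-- ===== SOURCE A (Python) =====
-- def conclusion_from_rollup(j):
--     roll=j.get("statusCheckRollup") or []
--     concl=[]
--     for x in roll:
--         c=x.get("conclusion")
--         s=x.get("status")
--         if c: concl.append(c)
--         elif s: concl.append(s)
--     if any(x in ("FAILURE","CANCELLED","TIMED_OUT","ACTION_REQUIRED") for x in concl):
--         return "FAIL"
--     if any(x in ("PENDING","IN_PROGRESS","QUEUED","REQUESTED","WAITING") for x in concl):
--         return "PENDING"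
--     if concl and all(x in ("SUCCESS","SKIPPED","NEUTRAL") for x in concl):
--         return "PASS"
--     return "UNKNOWN"
-- ===== SOURCE B (Python) =====
-- def conclusion_from_rollup(j):
--     has_fail = has_pending = has_other = False
--     seen = 0
--     for x in (j.get("statusCheckRollup") or []):
--         c = x.get("conclusion") or x.get("status")
--         if not c:
--             continue
--         seen += 1
--         if c in ("FAILURE", "CANCELLED", "TIMED_OUT", "ACTION_REQUIRED"):
--             has_fail = True
--         elif c in ("PENDING", "IN_PROGRESS", "QUEUED", "REQUESTED", "WAITING"):
--             has_pending = True
--         elif c not in ("SUCCESS", "SKIPPED", "NEUTRAL"):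
--             has_other = True
--     if has_fail:
--         return "FAIL"
--     if has_pending:
--         return "PENDING"
--     if seen and not has_other:
--         return "PASS"
--     return "UNKNOWN"
-- ===== Notes on version B (the rewrite author's own statement) =====
-- stated objective: simpler
-- what changed: Replaces the build-an-intermediate-list-then-three-scans structure with a single pass that accumulates has_fail/has_pending/has_other flags and a seen counter, deciding the verdict once from the flags.
import Mathlib
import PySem

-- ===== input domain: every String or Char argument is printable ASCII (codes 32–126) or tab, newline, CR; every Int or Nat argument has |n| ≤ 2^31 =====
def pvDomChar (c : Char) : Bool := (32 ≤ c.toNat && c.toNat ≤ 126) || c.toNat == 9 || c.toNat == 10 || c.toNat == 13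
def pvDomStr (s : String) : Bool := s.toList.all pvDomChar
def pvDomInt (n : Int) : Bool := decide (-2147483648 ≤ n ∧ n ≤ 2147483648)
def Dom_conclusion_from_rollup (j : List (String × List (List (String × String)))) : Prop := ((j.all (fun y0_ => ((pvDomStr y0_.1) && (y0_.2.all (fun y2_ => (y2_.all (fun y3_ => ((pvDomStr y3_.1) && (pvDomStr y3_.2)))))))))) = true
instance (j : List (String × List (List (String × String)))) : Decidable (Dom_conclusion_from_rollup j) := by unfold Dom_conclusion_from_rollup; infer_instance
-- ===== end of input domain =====

-- B replaces A's build-an-intermediate-list-then-three-scans structure with a single pass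
-- accumulating flags (has_fail/has_pending/has_other) and a seen counter (objective: simpler).

-- ===== PORT A =====
-- dicts are association lists; .get is first-match lookup (List.lookup)
def conclusion_from_rollup (j : List (String × List (List (String × String)))) : String :=
  let roll := (List.lookup "statusCheckRollup" j).getD []   -- 'or []' : an absent or empty value both give []
  let concl := roll.foldl (fun acc x =>
    match List.lookup "conclusion" x with
    | some c =>
      if c ≠ "" then acc ++ [c]                             -- 'if c:' — a string is truthy iff nonempty
      else match List.lookup "status" x with
           | some s => if s ≠ "" then acc ++ [s] else acc
           | none => acc
    | none =>
      match List.lookup "status" x with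
      | some s => if s ≠ "" then acc ++ [s] else acc
      | none => acc) []
  if concl.any (fun x => x == "FAILURE" || x == "CANCELLED" || x == "TIMED_OUT" || x == "ACTION_REQUIRED") then "FAIL"
  else if concl.any (fun x => x == "PENDING" || x == "IN_PROGRESS" || x == "QUEUED" || x == "REQUESTED" || x == "WAITING") then "PENDING"
  else if !concl.isEmpty && concl.all (fun x => x == "SUCCESS" || x == "SKIPPED" || x == "NEUTRAL") then "PASS"
  else "UNKNOWN"

-- ===== PORT B =====
def pvIsFail (c : String) : Bool := c == "FAILURE" || c == "CANCELLED" || c == "TIMED_OUT" || c == "ACTION_REQUIRED"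
def pvIsPend (c : String) : Bool := c == "PENDING" || c == "IN_PROGRESS" || c == "QUEUED" || c == "REQUESTED" || c == "WAITING"
def pvIsOk (c : String) : Bool := c == "SUCCESS" || c == "SKIPPED" || c == "NEUTRAL"

def conclusion_from_rollup_alt (j : List (String × List (List (String × String)))) : String :=
  let st := ((List.lookup "statusCheckRollup" j).getD []).foldl
    (fun (st : Bool × Bool × Bool × Nat) x =>
      -- c = x.get("conclusion") or x.get("status")
      let c? := match List.lookup "conclusion" x with
                | some c => if c ≠ "" then some c else List.lookup "status" x
                | none => List.lookup "status" x
      match c? with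
      | none => st
      | some c =>
        if c = "" then st                                   -- 'if not c: continue'
        else if pvIsFail c then (true, st.2.1, st.2.2.1, st.2.2.2 + 1)
        else if pvIsPend c then (st.1, true, st.2.2.1, st.2.2.2 + 1)
        else if !pvIsOk c then (st.1, st.2.1, true, st.2.2.2 + 1)
        else (st.1, st.2.1, st.2.2.1, st.2.2.2 + 1))
    (false, false, false, 0)
  if st.1 then "FAIL"
  else if st.2.1 then "PENDING"
  else if st.2.2.2 != 0 && !st.2.2.1 then "PASS"
  else "UNKNOWN"

-- ===== PRECONDITION & SPEC =====
def Spec_conclusion_from_rollup (j : List (String × List (List (String × String)))) (out : String) : Prop := out = conclusion_from_rollup_alt j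
instance (j : List (String × List (List (String × String)))) (out : String) : Decidable (Spec_conclusion_from_rollup j out) := by unfold Spec_conclusion_from_rollup; infer_instance

-- ===== CLAIM (what is proved, stated in full; the proofs are below) =====
def Claim_equal_conclusion_from_rollup : Prop := ∀ (j : List (String × List (List (String × String)))), Dom_conclusion_from_rollup j → Spec_conclusion_from_rollup j (conclusion_from_rollup j)

-- ===== LEMMAS AND PROOFS =====

-- proof-side names for the two loop bodies (definitionally the lambdas inside the ports)
def pvAStep (acc : List String) (x : List (String × String)) : List String :=
  match List.lookup "conclusion" x with
  | some c =>
    if c ≠ "" then acc ++ [c]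
    else match List.lookup "status" x with
         | some s => if s ≠ "" then acc ++ [s] else acc
         | none => acc
  | none =>
    match List.lookup "status" x with
    | some s => if s ≠ "" then acc ++ [s] else acc
    | none => acc

def pvBStep (st : Bool × Bool × Bool × Nat) (x : List (String × String)) : Bool × Bool × Bool × Nat :=
  let c? := match List.lookup "conclusion" x with
            | some c => if c ≠ "" then some c else List.lookup "status" x
            | none => List.lookup "status" x
  match c? with
  | none => st
  | some c =>
    if c = "" then st
    else if pvIsFail c then (true, st.2.1, st.2.2.1, st.2.2.2 + 1)
    else if pvIsPend c then (st.1, true, st.2.2.1, st.2.2.2 + 1)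
    else if !pvIsOk c then (st.1, st.2.1, true, st.2.2.2 + 1)
    else (st.1, st.2.1, st.2.2.1, st.2.2.2 + 1)

-- the effective conclusion A appends for one rollup item (at most one string, never "")
def pvEff (x : List (String × String)) : List String :=
  match List.lookup "conclusion" x with
  | some c =>
    if c ≠ "" then [c]
    else match List.lookup "status" x with
         | some s => if s ≠ "" then [s] else []
         | none => []
  | none =>
    match List.lookup "status" x with
    | some s => if s ≠ "" then [s] else []
    | none => []

-- B's flag update for a single (nonempty) effective conclusion
def pvStep (st : Bool × Bool × Bool × Nat) (c : String) : Bool × Bool × Bool × Nat :=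
  if pvIsFail c then (true, st.2.1, st.2.2.1, st.2.2.2 + 1)
  else if pvIsPend c then (st.1, true, st.2.2.1, st.2.2.2 + 1)
  else if !pvIsOk c then (st.1, st.2.1, true, st.2.2.2 + 1)
  else (st.1, st.2.1, st.2.2.1, st.2.2.2 + 1)

theorem pvAStep_eff (acc : List String) (x : List (String × String)) :
    pvAStep acc x = acc ++ pvEff x := by
  unfold pvAStep pvEff
  rcases List.lookup "conclusion" x with _ | c <;>
    rcases List.lookup "status" x with _ | s <;>
    simp <;> split_ifs <;> simp

theorem pvA_fold (roll : List (List (String × String))) :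
    ∀ acc : List String, roll.foldl pvAStep acc = acc ++ roll.flatMap pvEff := by
  induction roll with
  | nil => simp
  | cons x xs ih =>
    intro acc
    rw [List.foldl_cons, ih, pvAStep_eff, List.flatMap_cons, List.append_assoc]

theorem pvBStep_eff (st : Bool × Bool × Bool × Nat) (x : List (String × String)) :
    pvBStep st x = (pvEff x).foldl pvStep st := by
  unfold pvBStep pvEff
  rcases List.lookup "conclusion" x with _ | c <;>
    rcases List.lookup "status" x with _ | s <;>
    simp <;> split_ifs <;> simp [pvStep, *]

theorem pvB_fold (roll : List (List (String × String))) :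
    ∀ st : Bool × Bool × Bool × Nat,
      roll.foldl pvBStep st = (roll.flatMap pvEff).foldl pvStep st := by
  induction roll with
  | nil => simp
  | cons x xs ih =>
    intro st
    rw [List.foldl_cons, ih, pvBStep_eff, List.flatMap_cons, List.foldl_append]

theorem pvStep_char (l : List String) :
    ∀ st : Bool × Bool × Bool × Nat,
      l.foldl pvStep st
      = (st.1 || l.any pvIsFail,
         st.2.1 || l.any (fun c => !pvIsFail c && pvIsPend c),
         st.2.2.1 || l.any (fun c => !pvIsFail c && !pvIsPend c && !pvIsOk c),
         st.2.2.2 + l.length) := by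
  induction l with
  | nil => simp
  | cons c l ih =>
    intro st
    have e1 : (pvStep st c).1 = (st.1 || pvIsFail c) := by
      unfold pvStep; split_ifs <;> simp_all
    have e2 : (pvStep st c).2.1 = (st.2.1 || (!pvIsFail c && pvIsPend c)) := by
      unfold pvStep; split_ifs <;> simp_all
    have e3 : (pvStep st c).2.2.1 = (st.2.2.1 || (!pvIsFail c && !pvIsPend c && !pvIsOk c)) := by
      unfold pvStep; split_ifs <;> simp_all
    have e4 : (pvStep st c).2.2.2 = st.2.2.2 + 1 := by
      unfold pvStep; split_ifs <;> simp_all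
    rw [List.foldl_cons, ih (pvStep st c)]
    simp only [List.any_cons, List.length_cons, Prod.mk.injEq]
    exact ⟨by rw [e1, Bool.or_assoc], by rw [e2, Bool.or_assoc], by rw [e3, Bool.or_assoc],
           by rw [e4]; omega⟩

theorem pv_any_and_not {α : Type} (l : List α) (f g : α → Bool) (h : l.any f = false) :
    l.any (fun c => !f c && g c) = l.any g := by
  induction l with
  | nil => rfl
  | cons a l ih => simp_all

theorem pv_any3 (l : List String) (hf : l.any pvIsFail = false) (hp : l.any pvIsPend = false) :
    l.any (fun c => !pvIsFail c && !pvIsPend c && !pvIsOk c) = l.any (fun c => !pvIsOk c) := by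
  induction l with
  | nil => rfl
  | cons a l ih => simp_all

theorem pv_len_ne (l : List String) : (l.length != 0) = !l.isEmpty := by
  cases l <;> rfl

-- ===== VERDICT (by name: the statement is the Claim_ definition above) =====
theorem conclusion_from_rollup_spec : Claim_equal_conclusion_from_rollup := by
  intro j _
  show conclusion_from_rollup j = conclusion_from_rollup_alt j
  have hA : conclusion_from_rollup j
      = (let concl := ((List.lookup "statusCheckRollup" j).getD []).foldl pvAStep [];
         if concl.any pvIsFail then "FAIL"
         else if concl.any pvIsPend then "PENDING"
         else if !concl.isEmpty && concl.all pvIsOk then "PASS"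
         else "UNKNOWN") := rfl
  have hB : conclusion_from_rollup_alt j
      = (let st := ((List.lookup "statusCheckRollup" j).getD []).foldl pvBStep (false, false, false, 0);
         if st.1 then "FAIL"
         else if st.2.1 then "PENDING"
         else if st.2.2.2 != 0 && !st.2.2.1 then "PASS"
         else "UNKNOWN") := rfl
  rw [hA, hB]
  simp only [pvA_fold, pvB_fold, pvStep_char, List.nil_append, Bool.false_or, Nat.zero_add]
  set l := ((List.lookup "statusCheckRollup" j).getD []).flatMap pvEff with hl
  by_cases hF : l.any pvIsFail = true
  · rw [if_pos hF, if_pos hF]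
  · rw [Bool.not_eq_true] at hF
    have hF' : ¬ (l.any pvIsFail = true) := by simp [hF]
    rw [if_neg hF', if_neg hF', pv_any_and_not _ _ _ hF]
    by_cases hP : l.any pvIsPend = true
    · rw [if_pos hP, if_pos hP]
    · rw [Bool.not_eq_true] at hP
      have hP' : ¬ (l.any pvIsPend = true) := by simp [hP]
      rw [if_neg hP', if_neg hP', pv_any3 _ hF hP, pv_len_ne, List.all_eq_not_any_not]
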